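-- pv_equiv track=rewrite | github.com/seanlam-ece/PDK_Generator | PDK_Generator/techgen/drc.py | convert_layer_name
-- ===== SOURCE A (Python) =====
-- def convert_layer_name(layer_name):
--     """Convert layer name to a Ruby variable name
--
--     Replace spaces with underscores, plus signs with 'p', minus signs with 'n'.
--     Resultant Ruby variable name must be syntactically correct in Ruby
--     language.
--
--     Parameters
--     ----------
--     layer_name : str
--         Layer name found in Process YAML
--
--     Returns
--     -------
--     layer_name : str
--         Syntactically-correct Ruby variable name
--
--     """
--     layer_name_split = layer_name.split(" ")
--     num_spaces = len(layer_name.split(" "))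
--     if num_spaces > 1:
--         layer_name = "layer"
--         for name in layer_name_split:
--             layer_name += "_" + name
--     else:
--         layer_name = "layer_" + layer_name_split[0]
--
--     layer_name = layer_name.replace("+","p")
--     layer_name = layer_name.replace("-","n")
--     return layer_name
-- ===== SOURCE B (Python) =====
-- def convert_layer_name(layer_name):
--     """Convert layer name to a Ruby variable name (closed-form replaces)."""
--     return ('layer_' + layer_name.replace(' ', '_')).replace('+', 'p').replace('-', 'n')
-- ===== Notes on version B (the rewrite author's own statement) =====
-- stated objective: simpler
-- what changed: Replaces A's split-then-branch-then-rebuild loop with a single closed-form expression: the constant prefix plus str.replace of spaces with underscores (both of A's branches reduce to this), followed by the same +/- replaces.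
import Mathlib
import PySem

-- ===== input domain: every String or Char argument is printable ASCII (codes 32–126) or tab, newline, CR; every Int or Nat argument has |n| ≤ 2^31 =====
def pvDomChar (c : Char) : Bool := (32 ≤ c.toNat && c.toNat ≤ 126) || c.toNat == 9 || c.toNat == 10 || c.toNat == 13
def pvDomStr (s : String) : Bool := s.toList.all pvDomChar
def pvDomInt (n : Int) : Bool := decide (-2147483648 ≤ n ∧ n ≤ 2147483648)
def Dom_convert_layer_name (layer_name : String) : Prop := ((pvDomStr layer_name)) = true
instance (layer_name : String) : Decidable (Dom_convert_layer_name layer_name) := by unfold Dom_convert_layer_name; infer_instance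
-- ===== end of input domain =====

-- B replaces A's split/branch/rebuild loop with one closed-form expression: "layer_" ++ spaces→underscores, then the same +/- replaces.


-- ===== PORT A =====
def convert_layer_name (layer_name : String) : String :=
  -- layer_name.split(" "): sep " " is nonempty, so split? is always `some`
  let layer_name_split := (PySem.Str.split? layer_name " ").getD []
  let num_spaces := ((PySem.Str.split? layer_name " ").getD []).length
  let name :=
    if num_spaces > 1 then
      layer_name_split.foldl (fun acc nm => acc ++ "_" ++ nm) "layer"
    else
      -- layer_name_split[0]; split always returns ≥ 1 part, so `none` is unreachable
      match PySem.List.pyGet? layer_name_split 0 with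
      | some p => "layer_" ++ p
      | none => ""
  PySem.Str.replace (PySem.Str.replace name "+" "p") "-" "n"

-- ===== PORT B =====
def convert_layer_name_alt (layer_name : String) : String :=
  PySem.Str.replace
    (PySem.Str.replace ("layer_" ++ PySem.Str.replace layer_name " " "_") "+" "p")
    "-" "n"

-- ===== PRECONDITION & SPEC =====
def Spec_convert_layer_name (layer_name : String) (out : String) : Prop := out = convert_layer_name_alt layer_name
instance (layer_name : String) (out : String) : Decidable (Spec_convert_layer_name layer_name out) := by unfold Spec_convert_layer_name; infer_instance

-- ===== CLAIM (what is proved, stated in full; the proofs are below) =====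
def Claim_equal_convert_layer_name : Prop := ∀ (layer_name : String), Dom_convert_layer_name layer_name → Spec_convert_layer_name layer_name (convert_layer_name layer_name)

-- ===== LEMMAS AND PROOFS =====

/-- Reference split on a single space: `pre` is the chunk accumulated so far. -/
def splitSp (pre : List Char) : List Char → List (List Char)
  | [] => [pre]
  | c :: rest => if c = ' ' then pre :: splitSp [] rest else splitSp (pre ++ [c]) rest

/-- Spaces-to-underscores as a map. -/
def rep (l : List Char) : List Char := l.map (fun c => if c = ' ' then '_' else c)

lemma splitSp_ne_nil (pre l) : splitSp pre l ≠ [] := by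
  induction l generalizing pre with
  | nil => simp [splitSp]
  | cons c rest ih => by_cases h : c = ' ' <;> simp [splitSp, h, ih]

lemma splitOn_go_eq (fuel : ℕ) : ∀ (l cur acc : _), l.length < fuel →
    PySem.Chars.splitOn.go [' '] fuel l cur acc = acc.reverse ++ splitSp cur.reverse l := by
  induction fuel with
  | zero => intro l cur acc h; omega
  | succ f ih =>
    intro l cur acc h
    cases l with
    | nil => simp [PySem.Chars.splitOn.go, splitSp]
    | cons c rest =>
      by_cases hc : c = ' '
      · subst hc
        simp only [PySem.Chars.splitOn.go, List.isPrefixOf, BEq.rfl, Bool.true_and,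
          if_pos, List.length_cons, List.drop_succ_cons]
        rw [ih _ _ _ (by simpa using Nat.lt_of_succ_lt_succ h)]
        simp [splitSp]
      · simp only [PySem.Chars.splitOn.go]
        rw [if_neg (by simp [List.isPrefixOf]; exact fun h' => hc h'.symm)]
        rw [ih _ _ _ (by simpa using Nat.lt_of_succ_lt_succ h)]
        simp [splitSp, hc]

lemma splitOn_eq (cs : List Char) : PySem.Chars.splitOn cs [' '] = splitSp [] cs := by
  unfold PySem.Chars.splitOn
  rw [splitOn_go_eq _ _ _ _ (by omega)]; simp

lemma replace_go_eq (fuel : ℕ) : ∀ (l acc : _), l.length ≤ fuel →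
    PySem.Chars.replace.go [' '] ['_'] fuel l acc = acc.reverse ++ rep l := by
  induction fuel with
  | zero =>
    intro l acc h
    have : l = [] := List.eq_nil_of_length_eq_zero (Nat.le_zero.mp h)
    subst this; simp [PySem.Chars.replace.go, rep]
  | succ f ih =>
    intro l acc h
    cases l with
    | nil => simp [PySem.Chars.replace.go, rep]
    | cons c rest =>
      by_cases hc : c = ' '
      · subst hc
        simp only [PySem.Chars.replace.go, List.isPrefixOf, BEq.rfl, Bool.true_and,
          if_pos, List.length_cons, List.drop_succ_cons]
        rw [ih _ _ (by simpa using Nat.le_of_succ_le_succ h)]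
        simp [rep]
      · simp only [PySem.Chars.replace.go]
        rw [if_neg (by simp [List.isPrefixOf]; exact fun h' => hc h'.symm)]
        rw [ih _ _ (by simpa using Nat.le_of_succ_le_succ h)]
        simp [rep, hc]

lemma replace_space (cs : List Char) : PySem.Chars.replace cs [' '] ['_'] = rep cs := by
  unfold PySem.Chars.replace
  rw [if_neg (by simp)]
  rw [replace_go_eq _ _ _ (by omega)]; simp

/-- Joining the split pieces with '_' recovers the space→underscore map. -/
lemma join_splitSp (l pre : List Char) :
    PySem.Chars.join ['_'] (splitSp pre l) = pre ++ rep l := by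
  induction l generalizing pre with
  | nil => simp [splitSp, PySem.Chars.join, rep, List.intercalate]
  | cons c rest ih =>
    by_cases hc : c = ' '
    · subst hc
      simp only [splitSp, if_true]
      have hne := splitSp_ne_nil [] rest
      obtain ⟨x, xs, hx⟩ := List.exists_cons_of_ne_nil hne
      rw [show PySem.Chars.join ['_'] (pre :: splitSp [] rest)
            = pre ++ ['_'] ++ PySem.Chars.join ['_'] (splitSp [] rest) by
        rw [hx]; simp [PySem.Chars.join, List.intercalate]]
      rw [ih]; simp [rep]
    · simp only [splitSp, if_neg hc]
      rw [ih]; simp [rep, hc]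

/-- A's foldl rebuild, on the char level. -/
lemma foldl_toList (parts : List String) (s : String) :
    (parts.foldl (fun acc nm => acc ++ "_" ++ nm) s).toList
      = s.toList ++ (parts.map String.toList).flatMap (fun p => '_' :: p) := by
  induction parts generalizing s with
  | nil => simp
  | cons p rest ih => simp [ih, List.flatMap]

lemma flatMap_eq_join (ps : List (List Char)) (hne : ps ≠ []) :
    ps.flatMap (fun p => '_' :: p) = '_' :: PySem.Chars.join ['_'] ps := by
  induction ps with
  | nil => simp at hne
  | cons p rest ih =>
    cases rest with
    | nil => simp [PySem.Chars.join, List.intercalate]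
    | cons q rs =>
      rw [List.flatMap_cons, ih (by simp)]
      simp [PySem.Chars.join, List.intercalate]

lemma split_toList (s : String) :
    ((PySem.Str.split? s " ").getD []).map String.toList = splitSp [] s.toList := by
  have h := PySem.Str.split?_map s " "
  have h2 : PySem.Chars.split? s.toList " ".toList
      = some (PySem.Chars.splitOn s.toList [' ']) := by
    simp [PySem.Chars.split?]
  rw [h2] at h
  cases hs : PySem.Str.split? s " " with
  | none => rw [hs] at h; simp at h
  | some parts =>
    rw [hs] at h; simp at h
    simp [h, splitOn_eq]

lemma split_ne_nil (s : String) : (PySem.Str.split? s " ").getD [] ≠ [] := by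
  intro hnil
  have := split_toList s
  rw [hnil] at this
  exact splitSp_ne_nil [] s.toList this.symm

/-- Core: A's `name` and B's `"layer_" ++ replace` agree on the char level. -/
lemma name_eq (s : String) :
    (if ((PySem.Str.split? s " ").getD []).length > 1 then
       ((PySem.Str.split? s " ").getD []).foldl (fun acc nm => acc ++ "_" ++ nm) "layer"
     else
       match PySem.List.pyGet? ((PySem.Str.split? s " ").getD []) 0 with
       | some p => "layer_" ++ p
       | none => "") = "layer_" ++ PySem.Str.replace s " " "_" := by
  apply String.ext
  have hrep : (PySem.Str.replace s " " "_").toList = rep s.toList := by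
    rw [PySem.Str.toList_replace]; exact replace_space s.toList
  set parts := (PySem.Str.split? s " ").getD [] with hparts
  have hmap : parts.map String.toList = splitSp [] s.toList := split_toList s
  have hne : parts ≠ [] := split_ne_nil s
  have hjoin : PySem.Chars.join ['_'] (parts.map String.toList) = rep s.toList := by
    rw [hmap, join_splitSp]; simp
  by_cases hlen : parts.length > 1
  · simp only [if_pos hlen, foldl_toList]
    rw [flatMap_eq_join _ (by simpa using hne), hjoin]
    simp [hrep]
  · simp only [if_neg hlen]
    obtain ⟨p, rest, hp⟩ := List.exists_cons_of_ne_nil hne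
    have hrest : rest = [] := by
      cases rest with
      | nil => rfl
      | cons q rs => exfalso; apply hlen; rw [hp]; simp
    subst hrest
    rw [hp]
    simp only [PySem.List.pyGet?]
    norm_num [PySem.List.pyIdx?]
    have : PySem.Chars.join ['_'] [p.toList] = rep s.toList := by
      rw [← hjoin, hp]; rfl
    simp only [PySem.Chars.join, List.intercalate] at this
    simp at this
    simp [this, replace_space]

-- ===== VERDICT (by name: the statement is the Claim_ definition above) =====
theorem convert_layer_name_spec : Claim_equal_convert_layer_name := by
  intro s _
  unfold Spec_convert_layer_name convert_layer_name convert_layer_name_alt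
  simp only []
  rw [name_eq s]
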